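-- pv_equiv track=rewrite | github.com/rpbgit/adif-qso-analyzer | src/metrics_analyzer.py | _generate_band_mode_breakdown
-- ===== SOURCE A (Python) =====
-- from typing import List, Dict, Any
--
-- def _generate_band_mode_breakdown(qsos: List[Dict[str, Any]]) -> list:
--     section = []
--     band_mode_counts = {}
--     band_set = set()
--     mode_set = set()
--     for qso in qsos:
--         band = qso.get('BAND', 'UNKNOWN')
--         mode = qso.get('MODE', 'UNKNOWN')
--         band_set.add(band)
--         mode_set.add(mode)
--         if band not in band_mode_counts:
--             band_mode_counts[band] = {}
--         band_mode_counts[band][mode] = band_mode_counts[band].get(mode, 0) + 1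
--     preferred_band_order = ['160M', '80M', '60M', '40M', '30M', '20M', '17M', '15M', '12M', '10M', '6M', '4M', '2M', '1.25M', '70CM']
--     bands = [b for b in preferred_band_order if b in band_set]
--     bands += sorted(b for b in band_set if b not in bands and b != 'UNKNOWN')
--     if 'UNKNOWN' in band_set:
--         bands.append('UNKNOWN')
--     mode_display_map = {}
--     for m in mode_set:
--         m_upper = m.upper()
--         if m_upper == 'CW':
--             mode_display_map[m] = 'CW'
--         elif m_upper in ['SSB', 'PHONE', 'FM', 'AM']:
--             mode_display_map[m] = 'Phone'
--         elif m_upper in ['FT8', 'FT4', 'PSK31', 'DIGITAL', 'DIG']: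
--             mode_display_map[m] = 'DIG'
--         else:
--             mode_display_map[m] = m
--     display_modes = set(mode_display_map.values())
--     modes = [m for m in ['CW', 'Phone', 'DIG'] if m in display_modes]
--     modes += sorted(m for m in display_modes if m not in modes)
--     band_mode_summary = {}
--     for band in bands:
--         band_mode_summary[band] = {}
--         for mode in mode_set:
--             display_mode = mode_display_map[mode]
--             band_mode_summary[band][display_mode] = band_mode_summary[band].get(display_mode, 0) + band_mode_counts.get(band, {}).get(mode, 0)
--     band_totals = {}
--     mode_totals = {m: 0 for m in modes}
--     grand_total = 0
--     for band in bands: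
--         band_total = 0
--         for mode in modes:
--             count = band_mode_summary.get(band, {}).get(mode, 0)
--             band_total += count
--             mode_totals[mode] += count
--         band_totals[band] = band_total
--         grand_total += band_total
--     section.append("")
--     section.append("BAND/MODE BREAKDOWN:")
--     section.append(" Band  |   CW  |  SSB  |  Dig  | Total |  %")
--     section.append("-------|-------|-------|-------|-------|-----")
--     for band in bands:
--         cw = band_mode_summary[band].get('CW', 0)
--         phone = band_mode_summary[band].get('Phone', 0)
--         dig = band_mode_summary[band].get('DIG', 0)
--         total = band_totals[band]
--         pct = int(round((total / grand_total * 100))) if grand_total > 0 else 0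
--         line = f" {band:<5} | {cw:5d} | {phone:5d} | {dig:5d} | {total:5d} | {pct:3d}"
--         section.append(line)
--     section.append("-------|-------|-------|-------|-------|-----")
--     total_row = f" Total | {mode_totals.get('CW', 0):5d} | {mode_totals.get('Phone', 0):5d} | {mode_totals.get('DIG', 0):5d} | {grand_total:5d} | 100"
--     section.append(total_row)
--     return section
-- ===== SOURCE B (Python) =====
-- def _generate_band_mode_breakdown(qsos):
--     # One pass: per-band [CW, Phone, DIG, total] counters plus global mode totals;
--     # no intermediate raw-mode count dict, no display-mode remap table, no modes list.
--     counts = {}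
--     cw_t = phone_t = dig_t = 0
--     for qso in qsos:
--         band = qso.get('BAND', 'UNKNOWN')
--         m = qso.get('MODE', 'UNKNOWN').upper()
--         c = counts.setdefault(band, [0, 0, 0, 0])
--         c[3] += 1
--         if m == 'CW':
--             c[0] += 1
--             cw_t += 1
--         elif m in ('SSB', 'PHONE', 'FM', 'AM'):
--             c[1] += 1
--             phone_t += 1
--         elif m in ('FT8', 'FT4', 'PSK31', 'DIGITAL', 'DIG'):
--             c[2] += 1
--             dig_t += 1
--     preferred_band_order = ['160M', '80M', '60M', '40M', '30M', '20M', '17M', '15M', '12M', '10M', '6M', '4M', '2M', '1.25M', '70CM']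
--     bands = [b for b in preferred_band_order if b in counts]
--     bands += sorted(b for b in counts if b not in preferred_band_order and b != 'UNKNOWN')
--     if 'UNKNOWN' in counts:
--         bands.append('UNKNOWN')
--     grand_total = len(qsos)
--     section = ["", "BAND/MODE BREAKDOWN:",
--                " Band  |   CW  |  SSB  |  Dig  | Total |  %",
--                "-------|-------|-------|-------|-------|-----"]
--     for band in bands:
--         cw, phone, dig, total = counts[band]
--         pct = int(round((total / grand_total * 100))) if grand_total > 0 else 0
--         section.append(f" {band:<5} | {cw:5d} | {phone:5d} | {dig:5d} | {total:5d} | {pct:3d}")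
--     section.append("-------|-------|-------|-------|-------|-----")
--     section.append(f" Total | {cw_t:5d} | {phone_t:5d} | {dig_t:5d} | {grand_total:5d} | 100")
--     return section
-- ===== Notes on version B (the rewrite author's own statement) =====
-- stated objective: simpler
-- what changed: B replaces A's three-stage pipeline (raw band/mode count dict, mode->display remap table built in a second loop, then a band x mode summary/totals double loop) with one pass that classifies each QSO's mode directly and increments per-band [CW, Phone, DIG, total] counters plus global mode totals, deriving the grand total as len(qsos); the band ordering and row formatting are unchanged.
import Mathlib
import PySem

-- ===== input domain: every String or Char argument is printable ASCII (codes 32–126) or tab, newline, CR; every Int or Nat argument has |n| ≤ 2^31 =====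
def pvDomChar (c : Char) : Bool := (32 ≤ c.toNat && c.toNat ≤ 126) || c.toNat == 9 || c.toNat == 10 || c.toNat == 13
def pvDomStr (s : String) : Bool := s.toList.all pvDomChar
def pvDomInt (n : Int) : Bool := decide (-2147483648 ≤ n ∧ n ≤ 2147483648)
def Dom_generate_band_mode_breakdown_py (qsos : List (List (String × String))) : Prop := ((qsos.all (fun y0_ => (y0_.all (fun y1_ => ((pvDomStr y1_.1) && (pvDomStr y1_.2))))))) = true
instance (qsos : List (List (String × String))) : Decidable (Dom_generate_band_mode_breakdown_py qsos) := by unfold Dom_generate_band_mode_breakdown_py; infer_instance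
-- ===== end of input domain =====

-- B is one classify-and-count pass (simpler decomposition); A's raw-mode count dict, remap table and
-- band×mode summary/totals loops disappear.  Equivalence is proved on the return value for all inputs.

-- shared constants/helpers (both Pythons contain the same literals, f-string formats and pct expression)
def pvPref : List String := ["160M", "80M", "60M", "40M", "30M", "20M", "17M", "15M", "12M", "10M", "6M", "4M", "2M", "1.25M", "70CM"]
def pvHdr : String := " Band  |   CW  |  SSB  |  Dig  | Total |  %"
def pvSep : String := "-------|-------|-------|-------|-------|-----"

-- round-half-to-even of num/den (den > 0)
def pvRHE (num den : Nat) : Nat :=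
  let q := num / den
  let r := num % den
  if den < 2 * r then q + 1
  else if 2 * r < den then q
  else if q % 2 = 0 then q else q + 1

-- exact binary64 model of Python's  int(round(total / grand * 100))  for 0 < grand:
-- round total/grand to nearest double (ties to even), multiply by 100 and round again, then round
-- half-to-even to an integer (validated against CPython on exhaustive small and random large inputs).
def pvPct (total grand : Nat) : Nat :=
  if total = 0 then 0
  else
    let s0 := 53 + (Nat.log2 grand + 1)
    let N := total * 2 ^ s0
    let sh := Nat.log2 (N / grand) - 52
    let m := pvRHE N (grand * 2 ^ sh)
    let p := if m = 2 ^ 53 then (2 ^ 52, sh + 1) else (m, sh)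
    let t2 := p.1 * 100
    let sh2 := Nat.log2 t2 - 52
    let m2 := pvRHE t2 (2 ^ sh2)
    let p2 := if m2 = 2 ^ 53 then (2 ^ 52, sh2 + 1) else (m2, sh2)
    let e2 : Int := (p.2 : Int) + p2.2 - s0
    if 0 ≤ e2 then p2.1 * 2 ^ e2.toNat else pvRHE p2.1 (2 ^ (-e2).toNat)

def pvNatChars (n : Nat) : List Char := PySem.Int.toChars (n : Int)
def pvRJ (cs : List Char) (w : Nat) : List Char := List.replicate (w - cs.length) ' ' ++ cs
def pvLJ (cs : List Char) (w : Nat) : List Char := cs ++ List.replicate (w - cs.length) ' '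

-- f" {band:<5} | {cw:5d} | {phone:5d} | {dig:5d} | {total:5d} | {pct:3d}" (the total row is the same
-- format with band = "Total" and pct = 100)
def pvFmtRow (band : String) (cw phone dig total pct : Nat) : String :=
  String.ofList ((' ' :: pvLJ band.toList 5) ++ " | ".toList ++ pvRJ (pvNatChars cw) 5
    ++ " | ".toList ++ pvRJ (pvNatChars phone) 5 ++ " | ".toList ++ pvRJ (pvNatChars dig) 5
    ++ " | ".toList ++ pvRJ (pvNatChars total) 5 ++ " | ".toList ++ pvRJ (pvNatChars pct) 3)

-- ===== PORT A =====

-- one iteration of A's first loop: count band×mode, collect band and mode sets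
def pvStepA (st : PySem.Dict String (PySem.Dict String Nat) × PySem.Set String × PySem.Set String)
    (qso : List (String × String)) :
    PySem.Dict String (PySem.Dict String Nat) × PySem.Set String × PySem.Set String :=
  let band := (PySem.Dict.mk qso).getD "BAND" "UNKNOWN"
  let mode := (PySem.Dict.mk qso).getD "MODE" "UNKNOWN"
  (st.1.modify band PySem.Dict.empty (fun inner => inner.modify mode 0 (· + 1)),
   PySem.Set.add st.2.1 band, PySem.Set.add st.2.2 mode)

def generate_band_mode_breakdown_py (qsos : List (List (String × String))) : List String :=
  let st := qsos.foldl pvStepA (PySem.Dict.empty, PySem.Set.empty, PySem.Set.empty)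
  let bmc := st.1
  let bset := st.2.1
  let mset := st.2.2
  let bands1 := pvPref.filter (fun b => PySem.Set.contains bset b)
  let bands2 := bands1 ++ PySem.List.sorted (bset.filter (fun b => !bands1.contains b && !(b == "UNKNOWN"))) (fun x => x) false
  let bands := if PySem.Set.contains bset "UNKNOWN" then bands2 ++ ["UNKNOWN"] else bands2
  let mdm := mset.foldl (fun (d : PySem.Dict String String) m =>
      let mu := PySem.Str.upper m
      if mu == "CW" then d.insert m "CW"
      else if ["SSB", "PHONE", "FM", "AM"].contains mu then d.insert m "Phone"
      else if ["FT8", "FT4", "PSK31", "DIGITAL", "DIG"].contains mu then d.insert m "DIG"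
      else d.insert m m) PySem.Dict.empty
  let displayModes := PySem.Set.ofList mdm.values
  let modes1 := (["CW", "Phone", "DIG"] : List String).filter (fun m => PySem.Set.contains displayModes m)
  let modes := modes1 ++ PySem.List.sorted (displayModes.filter (fun m => !modes1.contains m)) (fun x => x) false
  let bms := bands.foldl (fun (s : PySem.Dict String (PySem.Dict String Nat)) band =>
      mset.foldl (fun s mode =>
          let dm := mdm.getD mode ""   -- mode_display_map[mode]; the key is always present
          s.modify band PySem.Dict.empty
            (fun inner => inner.modify dm 0 (· + (bmc.getD band PySem.Dict.empty).getD mode 0)))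
        (s.insert band PySem.Dict.empty)) PySem.Dict.empty
  let mt0 : PySem.Dict String Nat := modes.foldl (fun d m => d.insert m 0) PySem.Dict.empty
  let tot := bands.foldl (fun (acc : PySem.Dict String Nat × PySem.Dict String Nat × Nat) band =>
      let p := modes.foldl (fun (p : Nat × PySem.Dict String Nat) mode =>
          let count := (bms.getD band PySem.Dict.empty).getD mode 0
          (p.1 + count, p.2.modify mode 0 (· + count))) (0, acc.2.1)
      (acc.1.insert band p.1, p.2, acc.2.2 + p.1)) (PySem.Dict.empty, mt0, 0)
  let bandTotals := tot.1
  let modeTotals := tot.2.1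
  let grand := tot.2.2
  let sec0 := ["", "BAND/MODE BREAKDOWN:", pvHdr, pvSep]
  let sec := bands.foldl (fun sec band =>
      let cw := (bms.getD band PySem.Dict.empty).getD "CW" 0
      let phone := (bms.getD band PySem.Dict.empty).getD "Phone" 0
      let dig := (bms.getD band PySem.Dict.empty).getD "DIG" 0
      let total := bandTotals.getD band 0
      let pct := if 0 < grand then pvPct total grand else 0
      sec ++ [pvFmtRow band cw phone dig total pct]) sec0
  sec ++ [pvSep, pvFmtRow "Total" (modeTotals.getD "CW" 0) (modeTotals.getD "Phone" 0)
            (modeTotals.getD "DIG" 0) grand 100]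

-- ===== PORT B =====

-- one iteration of B's single pass: per-band (cw, phone, dig, total) counters + global cw/phone/dig
def pvStepB (st : PySem.Dict String (Nat × Nat × Nat × Nat) × Nat × Nat × Nat)
    (qso : List (String × String)) :
    PySem.Dict String (Nat × Nat × Nat × Nat) × Nat × Nat × Nat :=
  let band := (PySem.Dict.mk qso).getD "BAND" "UNKNOWN"
  let m := PySem.Str.upper ((PySem.Dict.mk qso).getD "MODE" "UNKNOWN")
  let c := st.1.getD band (0, 0, 0, 0)
  if m == "CW" then
    (st.1.insert band (c.1 + 1, c.2.1, c.2.2.1, c.2.2.2 + 1), st.2.1 + 1, st.2.2.1, st.2.2.2)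
  else if ["SSB", "PHONE", "FM", "AM"].contains m then
    (st.1.insert band (c.1, c.2.1 + 1, c.2.2.1, c.2.2.2 + 1), st.2.1, st.2.2.1 + 1, st.2.2.2)
  else if ["FT8", "FT4", "PSK31", "DIGITAL", "DIG"].contains m then
    (st.1.insert band (c.1, c.2.1, c.2.2.1 + 1, c.2.2.2 + 1), st.2.1, st.2.2.1, st.2.2.2 + 1)
  else
    (st.1.insert band (c.1, c.2.1, c.2.2.1, c.2.2.2 + 1), st.2.1, st.2.2.1, st.2.2.2)

def generate_band_mode_breakdown_py_alt (qsos : List (List (String × String))) : List String :=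
  let st := qsos.foldl pvStepB (PySem.Dict.empty, 0, 0, 0)
  let counts := st.1
  let bands1 := pvPref.filter (fun b => counts.contains b)
  let bands2 := bands1 ++ PySem.List.sorted (counts.keys.filter (fun b => !pvPref.contains b && !(b == "UNKNOWN"))) (fun x => x) false
  let bands := if counts.contains "UNKNOWN" then bands2 ++ ["UNKNOWN"] else bands2
  let grand := qsos.length
  let sec0 := ["", "BAND/MODE BREAKDOWN:", pvHdr, pvSep]
  let sec := bands.foldl (fun sec band =>
      let c := counts.getD band (0, 0, 0, 0)
      let pct := if 0 < grand then pvPct c.2.2.2 grand else 0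
      sec ++ [pvFmtRow band c.1 c.2.1 c.2.2.1 c.2.2.2 pct]) sec0
  sec ++ [pvSep, pvFmtRow "Total" st.2.1 st.2.2.1 st.2.2.2 grand 100]

-- ===== PRECONDITION & SPEC =====
def Spec_generate_band_mode_breakdown_py (qsos : List (List (String × String))) (out : List String) : Prop := out = generate_band_mode_breakdown_py_alt qsos
instance (qsos : List (List (String × String))) (out : List String) : Decidable (Spec_generate_band_mode_breakdown_py qsos out) := by unfold Spec_generate_band_mode_breakdown_py; infer_instance

-- ===== CLAIM (what is proved, stated in full; the proofs are below) =====
def Claim_equal_generate_band_mode_breakdown_py : Prop := ∀ (qsos : List (List (String × String))), Dom_generate_band_mode_breakdown_py qsos → Spec_generate_band_mode_breakdown_py qsos (generate_band_mode_breakdown_py qsos)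

-- ===== LEMMAS AND PROOFS =====

-- proof-side notions: band/mode of a QSO, the CW/Phone/DIG display classification, and QSO counts
def pvBand (q : List (String × String)) : String := (PySem.Dict.mk q).getD "BAND" "UNKNOWN"
def pvMode (q : List (String × String)) : String := (PySem.Dict.mk q).getD "MODE" "UNKNOWN"
def pvPhoneL : List String := ["SSB", "PHONE", "FM", "AM"]
def pvDigL : List String := ["FT8", "FT4", "PSK31", "DIGITAL", "DIG"]
def pvDisp (m : String) : String :=
  if PySem.Str.upper m == "CW" then "CW"
  else if pvPhoneL.contains (PySem.Str.upper m) then "Phone"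
  else if pvDigL.contains (PySem.Str.upper m) then "DIG"
  else m
def pvIsCW (m : String) : Bool := PySem.Str.upper m == "CW"
def pvIsPh (m : String) : Bool := !pvIsCW m && pvPhoneL.contains (PySem.Str.upper m)
def pvIsDg (m : String) : Bool :=
  !pvIsCW m && !pvPhoneL.contains (PySem.Str.upper m) && pvDigL.contains (PySem.Str.upper m)

def cBM (l : List (List (String × String))) (b m : String) : Nat :=
  l.countP (fun q => pvBand q == b && pvMode q == m)
def cBD (l : List (List (String × String))) (b d : String) : Nat :=
  l.countP (fun q => pvBand q == b && pvDisp (pvMode q) == d)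
def cB (l : List (List (String × String))) (b : String) : Nat :=
  l.countP (fun q => pvBand q == b)
def cD (l : List (List (String × String))) (d : String) : Nat :=
  l.countP (fun q => pvDisp (pvMode q) == d)

-- the display name is CW/Phone/DIG exactly when the uppercased mode is classified there
lemma pvDisp_eq_CW (m : String) : (pvDisp m == "CW") = pvIsCW m := by
  unfold pvDisp pvIsCW
  cases h1 : (PySem.Str.upper m == "CW") <;>
    cases h2 : pvPhoneL.contains (PySem.Str.upper m) <;>
      cases h3 : pvDigL.contains (PySem.Str.upper m) <;> simp [h1, h2, h3] <;>
        (intro hm; subst hm; revert h1; decide)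

lemma pvDisp_eq_Ph (m : String) : (pvDisp m == "Phone") = pvIsPh m := by
  unfold pvDisp pvIsPh pvIsCW
  cases h1 : (PySem.Str.upper m == "CW") <;>
    cases h2 : pvPhoneL.contains (PySem.Str.upper m) <;>
      cases h3 : pvDigL.contains (PySem.Str.upper m) <;> simp [h1, h2, h3] <;>
        (intro hm; subst hm; revert h2; decide)

lemma pvDisp_eq_Dg (m : String) : (pvDisp m == "DIG") = pvIsDg m := by
  unfold pvDisp pvIsDg pvIsCW
  cases h1 : (PySem.Str.upper m == "CW") <;>
    cases h2 : pvPhoneL.contains (PySem.Str.upper m) <;>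
      cases h3 : pvDigL.contains (PySem.Str.upper m) <;> simp [h1, h2, h3] <;>
        (intro hm; subst hm; revert h3; decide)

-- a sum of single-point indicator terms over a Nodup list picks out the one member
lemma pv_sum_single (ms : List String) (v : String) (h : String → Nat)
    (hnd : ms.Nodup) (hv : v ∈ ms) :
    (ms.map (fun m => if v = m then h m else 0)).sum = h v := by
  induction ms with
  | nil => cases hv
  | cons m rest ih =>
    rcases List.mem_cons.mp hv with rfl | hv'
    · have hz : (rest.map (fun m => if v = m then h m else 0)).sum = 0 := by
        apply List.sum_eq_zero; intro x hx
        obtain ⟨m', hm', rfl⟩ := List.mem_map.mp hx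
        rw [if_neg]; rintro rfl; exact (List.nodup_cons.mp hnd).1 hm'
      simp [hz]
    · have hne : v ≠ m := by rintro rfl; exact (List.nodup_cons.mp hnd).1 hv'
      simp [if_neg hne, ih (List.nodup_cons.mp hnd).2 hv']

lemma pv_sum_zero_of_not_mem (ms : List String) (v : String) (h : String → Nat)
    (hv : v ∉ ms) : (ms.map (fun m => if v = m then h m else 0)).sum = 0 := by
  apply List.sum_eq_zero; intro x hx
  obtain ⟨m', hm', rfl⟩ := List.mem_map.mp hx
  rw [if_neg]; rintro rfl; exact hv hm'

-- counting q-elements classified by f: summing the per-key counts over a Nodup covering key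
-- list (restricted by p) counts the elements whose key satisfies p
lemma pv_partition {α : Type} (l : List α) (f : α → String) (ms : List String)
    (q : α → Bool) (p : String → Bool) (hnd : ms.Nodup) (hcov : ∀ x ∈ l, f x ∈ ms) :
    (ms.map (fun m => if p m then l.countP (fun x => q x && f x == m) else 0)).sum
      = l.countP (fun x => q x && p (f x)) := by
  induction l with
  | nil => simp
  | cons x t ih =>
    have hcov' : ∀ y ∈ t, f y ∈ ms := fun y hy => hcov y (List.mem_cons_of_mem _ hy)
    have hterm : (fun m => if p m then (x :: t).countP (fun y => q y && f y == m) else 0)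
        = fun m => (if p m then t.countP (fun y => q y && f y == m) else 0)
            + (if f x = m then (if p m && q x then 1 else 0) else 0) := by
      funext m
      rw [List.countP_cons]
      by_cases hp : p m <;> by_cases hf : f x = m <;> by_cases hq : q x <;>
        simp [hp, hf, hq]
    rw [hterm, List.sum_map_add, ih hcov',
      pv_sum_single ms (f x) _ hnd (hcov x (List.mem_cons_self)), List.countP_cons]
    by_cases hp : p (f x) <;> by_cases hq : q x <;> simp [hp, hq]

-- ===== facts about A's first loop =====
lemma pvA_bset (l : List (List (String × String)))
    (st : PySem.Dict String (PySem.Dict String Nat) × PySem.Set String × PySem.Set String) :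
    (l.foldl pvStepA st).2.1 = PySem.Set.update st.2.1 (l.map pvBand) := by
  induction l generalizing st with
  | nil => rfl
  | cons q t ih => rw [List.foldl_cons, ih, List.map_cons, PySem.Set.update_cons]; rfl

lemma pvA_mset (l : List (List (String × String)))
    (st : PySem.Dict String (PySem.Dict String Nat) × PySem.Set String × PySem.Set String) :
    (l.foldl pvStepA st).2.2 = PySem.Set.update st.2.2 (l.map pvMode) := by
  induction l generalizing st with
  | nil => rfl
  | cons q t ih => rw [List.foldl_cons, ih, List.map_cons, PySem.Set.update_cons]; rfl

lemma pvA_bmc (l : List (List (String × String)))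
    (st : PySem.Dict String (PySem.Dict String Nat) × PySem.Set String × PySem.Set String)
    (b m : String) :
    (((l.foldl pvStepA st).1.getD b PySem.Dict.empty).getD m 0)
      = ((st.1.getD b PySem.Dict.empty).getD m 0) + cBM l b m := by
  induction l generalizing st with
  | nil => simp [cBM]
  | cons q t ih =>
    rw [List.foldl_cons, ih]
    have hstep : (pvStepA st q).1
        = st.1.modify (pvBand q) PySem.Dict.empty
            (fun inner => inner.modify (pvMode q) 0 (· + 1)) := rfl
    rw [hstep, PySem.Dict.getD_modify]
    unfold cBM
    rw [List.countP_cons]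
    by_cases hb : b = pvBand q
    · rw [if_pos hb]
      subst hb
      rw [PySem.Dict.getD_modify]
      by_cases hm : m = pvMode q
      · subst hm; simp; omega
      · rw [if_neg hm]
        have : (pvMode q == m) = false := by simp [Ne.symm hm]
        simp [this]
    · rw [if_neg hb]
      have : (pvBand q == b) = false := by simp [Ne.symm hb]
      simp [this]

-- ===== generic insert-fold lemmas (A's display map, A's mode-totals init, A's band totals) =====
lemma pv_foldl_insert_getD_not_mem {ν : Type} (g : String → ν) (l : List String)
    (d : PySem.Dict String ν) (k : String) (dflt : ν) (hk : k ∉ l) :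
    (l.foldl (fun d x => d.insert x (g x)) d).getD k dflt = d.getD k dflt := by
  induction l generalizing d with
  | nil => rfl
  | cons x t ih =>
    rw [List.foldl_cons, ih _ (fun h => hk (List.mem_cons_of_mem _ h)),
      PySem.Dict.getD_insert_of_ne _ _ _ (by rintro rfl; exact hk List.mem_cons_self)]

lemma pv_foldl_insert_getD {ν : Type} (g : String → ν) (l : List String)
    (d : PySem.Dict String ν) (k : String) (dflt : ν) (hnd : l.Nodup) (hk : k ∈ l) :
    (l.foldl (fun d x => d.insert x (g x)) d).getD k dflt = g k := by
  induction l generalizing d with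
  | nil => cases hk
  | cons x t ih =>
    rw [List.foldl_cons]
    rcases List.mem_cons.mp hk with rfl | hk'
    · rw [pv_foldl_insert_getD_not_mem _ _ _ _ _ (List.nodup_cons.mp hnd).1,
        PySem.Dict.getD_insert_self]
    · exact ih _ (List.nodup_cons.mp hnd).2 hk'

-- ===== A's band×mode summary double loop =====
lemma pvA_bms_inner_getD (F : String → PySem.Dict String Nat → PySem.Dict String Nat)
    (ms : List String) (s : PySem.Dict String (PySem.Dict String Nat)) (b : String) :
    (ms.foldl (fun s m => s.modify b PySem.Dict.empty (F m)) s).getD b PySem.Dict.empty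
      = ms.foldl (fun inn m => F m inn) (s.getD b PySem.Dict.empty) := by
  induction ms generalizing s with
  | nil => rfl
  | cons m t ih => rw [List.foldl_cons, ih, PySem.Dict.getD_modify_self, List.foldl_cons]

lemma pvA_bms_inner_other (F : String → PySem.Dict String Nat → PySem.Dict String Nat)
    (ms : List String) (s : PySem.Dict String (PySem.Dict String Nat)) (b b' : String)
    (h : b' ≠ b) :
    (ms.foldl (fun s m => s.modify b PySem.Dict.empty (F m)) s).getD b' PySem.Dict.empty
      = s.getD b' PySem.Dict.empty := by
  induction ms generalizing s with
  | nil => rfl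
  | cons m t ih => rw [List.foldl_cons, ih, PySem.Dict.getD_modify_of_ne _ _ _ h]

lemma pvA_bms_preserve (G : String → String → PySem.Dict String Nat → PySem.Dict String Nat)
    (bl ms : List String) (s : PySem.Dict String (PySem.Dict String Nat)) (b : String)
    (hb : b ∉ bl) :
    (bl.foldl (fun s band => ms.foldl
        (fun s mode => s.modify band PySem.Dict.empty (G band mode))
        (s.insert band PySem.Dict.empty)) s).getD b PySem.Dict.empty
      = s.getD b PySem.Dict.empty := by
  induction bl generalizing s with
  | nil => rfl
  | cons band t ih =>
    have hne : b ≠ band := by rintro rfl; exact hb List.mem_cons_self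
    rw [List.foldl_cons, ih _ (fun h => hb (List.mem_cons_of_mem _ h)),
      pvA_bms_inner_other _ _ _ _ _ hne, PySem.Dict.getD_insert_of_ne _ _ _ hne]

lemma pvA_bms_getD (G : String → String → PySem.Dict String Nat → PySem.Dict String Nat)
    (bl ms : List String) (s : PySem.Dict String (PySem.Dict String Nat)) (b : String)
    (hb : b ∈ bl) (hnd : bl.Nodup) :
    (bl.foldl (fun s band => ms.foldl
        (fun s mode => s.modify band PySem.Dict.empty (G band mode))
        (s.insert band PySem.Dict.empty)) s).getD b PySem.Dict.empty
      = ms.foldl (fun inn mode => G b mode inn) PySem.Dict.empty := by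
  induction bl generalizing s with
  | nil => cases hb
  | cons band t ih =>
    rw [List.foldl_cons]
    rcases List.mem_cons.mp hb with rfl | hb'
    · rw [pvA_bms_preserve _ _ _ _ _ (List.nodup_cons.mp hnd).1,
        pvA_bms_inner_getD, PySem.Dict.getD_insert_self]
    · exact ih _ hb' (List.nodup_cons.mp hnd).2

-- value of an accumulate-by-display-key inner loop
lemma pv_inner_val (ms : List String) (keyf : String → String) (g : String → Nat)
    (inn : PySem.Dict String Nat) (d0 : String) :
    (ms.foldl (fun inn m => inn.modify (keyf m) 0 (· + g m)) inn).getD d0 0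
      = inn.getD d0 0 + (ms.map (fun m => if d0 = keyf m then g m else 0)).sum := by
  induction ms generalizing inn with
  | nil => simp
  | cons m t ih =>
    rw [List.foldl_cons, ih, PySem.Dict.getD_modify, List.map_cons, List.sum_cons]
    by_cases h : d0 = keyf m
    · subst h; rw [if_pos rfl, if_pos rfl]; omega
    · rw [if_neg h, if_neg h]; omega

-- ===== facts about B's single pass =====
lemma pvStepB_eq (st : PySem.Dict String (Nat × Nat × Nat × Nat) × Nat × Nat × Nat)
    (q : List (String × String)) :
    pvStepB st q =
      (st.1.insert (pvBand q)
        ((st.1.getD (pvBand q) (0, 0, 0, 0)).1 + (if pvIsCW (pvMode q) then 1 else 0),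
         (st.1.getD (pvBand q) (0, 0, 0, 0)).2.1 + (if pvIsPh (pvMode q) then 1 else 0),
         (st.1.getD (pvBand q) (0, 0, 0, 0)).2.2.1 + (if pvIsDg (pvMode q) then 1 else 0),
         (st.1.getD (pvBand q) (0, 0, 0, 0)).2.2.2 + 1),
       st.2.1 + (if pvIsCW (pvMode q) then 1 else 0),
       st.2.2.1 + (if pvIsPh (pvMode q) then 1 else 0),
       st.2.2.2 + (if pvIsDg (pvMode q) then 1 else 0)) := by
  unfold pvStepB pvIsPh pvIsDg pvIsCW pvBand pvMode
  cases h1 : (PySem.Str.upper ((PySem.Dict.mk q).getD "MODE" "UNKNOWN") == "CW") <;>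
    cases h2 : pvPhoneL.contains (PySem.Str.upper ((PySem.Dict.mk q).getD "MODE" "UNKNOWN")) <;>
      cases h3 : pvDigL.contains (PySem.Str.upper ((PySem.Dict.mk q).getD "MODE" "UNKNOWN")) <;>
        (simp only [pvPhoneL, pvDigL] at h2 h3; simp only [h1, h2, h3]; simp)

lemma pvB_counters (l : List (List (String × String)))
    (st : PySem.Dict String (Nat × Nat × Nat × Nat) × Nat × Nat × Nat) :
    (l.foldl pvStepB st).2.1 = st.2.1 + l.countP (fun q => pvIsCW (pvMode q)) ∧
    (l.foldl pvStepB st).2.2.1 = st.2.2.1 + l.countP (fun q => pvIsPh (pvMode q)) ∧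
    (l.foldl pvStepB st).2.2.2 = st.2.2.2 + l.countP (fun q => pvIsDg (pvMode q)) := by
  induction l generalizing st with
  | nil => simp
  | cons q t ih =>
    rw [List.foldl_cons]
    obtain ⟨h1, h2, h3⟩ := ih (pvStepB st q)
    rw [List.countP_cons, List.countP_cons, List.countP_cons, h1, h2, h3, pvStepB_eq]
    refine ⟨?_, ?_, ?_⟩ <;> simp <;> omega

lemma pvB_keys (l : List (List (String × String)))
    (st : PySem.Dict String (Nat × Nat × Nat × Nat) × Nat × Nat × Nat) :
    (l.foldl pvStepB st).1.keys = PySem.Set.update st.1.keys (l.map pvBand) := by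
  induction l generalizing st with
  | nil => rfl
  | cons q t ih =>
    rw [List.foldl_cons, ih, List.map_cons, PySem.Set.update_cons]
    congr 1
    rw [pvStepB_eq]
    by_cases hc : st.1.contains (pvBand q) = true
    · rw [PySem.Dict.keys_insert_of_contains _ _ hc,
        PySem.Set.add_of_mem ((PySem.Dict.contains_iff_mem_keys _ _).mp hc)]
    · have hc' : st.1.contains (pvBand q) = false := eq_false_of_ne_true hc
      rw [PySem.Dict.keys_insert_of_not_contains _ _ hc',
        PySem.Set.add_of_not_mem (fun h => hc ((PySem.Dict.contains_iff_mem_keys _ _).mpr h))]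

lemma pvB_getD (l : List (List (String × String)))
    (st : PySem.Dict String (Nat × Nat × Nat × Nat) × Nat × Nat × Nat) (b : String) :
    (l.foldl pvStepB st).1.getD b (0, 0, 0, 0)
      = ((st.1.getD b (0, 0, 0, 0)).1 + l.countP (fun q => pvBand q == b && pvIsCW (pvMode q)),
         (st.1.getD b (0, 0, 0, 0)).2.1 + l.countP (fun q => pvBand q == b && pvIsPh (pvMode q)),
         (st.1.getD b (0, 0, 0, 0)).2.2.1 + l.countP (fun q => pvBand q == b && pvIsDg (pvMode q)),
         (st.1.getD b (0, 0, 0, 0)).2.2.2 + cB l b) := by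
  induction l generalizing st with
  | nil => simp [cB]
  | cons q t ih =>
    rw [List.foldl_cons, ih]
    unfold cB
    rw [List.countP_cons, List.countP_cons, List.countP_cons, List.countP_cons, pvStepB_eq]
    by_cases hb : b = pvBand q
    · subst hb
      rw [PySem.Dict.getD_insert_self]
      simp only [beq_self_eq_true, Bool.true_and]
      refine Prod.ext ?_ (Prod.ext ?_ (Prod.ext ?_ ?_)) <;> simp <;>
        (try split) <;> omega
    · rw [PySem.Dict.getD_insert_of_ne _ _ _ hb]
      have hq : (pvBand q == b) = false := by simp [Ne.symm hb]
      simp [hq]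

-- canonical value both ports are proved equal to
def pvBandsC (l : List (List (String × String))) : List String :=
  let K := PySem.Set.ofList (l.map pvBand)
  let first := pvPref.filter (fun b => K.contains b)
  let bands2 := first ++ PySem.List.sorted
    (K.filter (fun b => !pvPref.contains b && !(b == "UNKNOWN"))) (fun x => x) false
  if K.contains "UNKNOWN" then bands2 ++ ["UNKNOWN"] else bands2

def pvCanon (l : List (List (String × String))) : List String :=
  ["", "BAND/MODE BREAKDOWN:", pvHdr, pvSep]
  ++ (pvBandsC l).map (fun b => pvFmtRow b (cBD l b "CW") (cBD l b "Phone") (cBD l b "DIG")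
       (cB l b) (if 0 < l.length then pvPct (cB l b) l.length else 0))
  ++ [pvSep, pvFmtRow "Total" (cD l "CW") (cD l "Phone") (cD l "DIG") l.length 100]

-- A's totals loop: band-totals dict, mode-totals dict and grand total, separated
lemma pvA_tot (bl ms : List String) (c : String → String → Nat)
    (acc : PySem.Dict String Nat × PySem.Dict String Nat × Nat) :
    (bl.foldl (fun acc band =>
        ((acc.1.insert band
            (ms.foldl (fun p mode => (p.1 + c band mode, p.2.modify mode 0 (· + c band mode)))
              (0, acc.2.1)).1,
          (ms.foldl (fun p mode => (p.1 + c band mode, p.2.modify mode 0 (· + c band mode)))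
              (0, acc.2.1)).2,
          acc.2.2 + (ms.foldl (fun p mode => (p.1 + c band mode, p.2.modify mode 0 (· + c band mode)))
              (0, acc.2.1)).1)) ) acc)
      = (bl.foldl (fun bt band => bt.insert band ((ms.map (c band)).sum)) acc.1,
         bl.foldl (fun mt band => ms.foldl (fun mt mode => mt.modify mode 0 (· + c band mode)) mt) acc.2.1,
         acc.2.2 + (bl.map (fun band => (ms.map (c band)).sum)).sum) := by
  induction bl generalizing acc with
  | nil => simp
  | cons band t ih =>
    have hp : ∀ mt : PySem.Dict String Nat,
        ms.foldl (fun p mode => (p.1 + c band mode, p.2.modify mode 0 (· + c band mode))) (0, mt)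
          = ((ms.map (c band)).sum,
             ms.foldl (fun mt mode => mt.modify mode 0 (· + c band mode)) mt) := by
      intro mt
      rw [PySem.List.foldl_prod_mk (f := fun a mode => a + c band mode)
        (g := fun (mt : PySem.Dict String Nat) mode => mt.modify mode 0 (· + c band mode)), PySem.List.foldl_add_nat]
      simp
    rw [List.foldl_cons, ih]
    simp only [hp, List.foldl_cons, List.map_cons, List.sum_cons]
    simp only [Prod.mk.injEq]
    refine ⟨trivial, trivial, ?_⟩
    omega

-- mode-totals accumulation across bands
lemma pvA_mt (bl ms : List String) (c : String → String → Nat) (mt : PySem.Dict String Nat)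
    (m0 : String) :
    (bl.foldl (fun mt band => ms.foldl (fun mt mode => mt.modify mode 0 (· + c band mode)) mt) mt).getD m0 0
      = mt.getD m0 0
        + (bl.map (fun band => (ms.map (fun m => if m0 = m then c band m else 0)).sum)).sum := by
  induction bl generalizing mt with
  | nil => simp
  | cons band t ih =>
    rw [List.foldl_cons, ih, pv_inner_val ms (fun m => m) (c band) mt m0, List.map_cons,
      List.sum_cons]
    omega

lemma pv_mt0 (ms : List String) (hnd : ms.Nodup) (m0 : String) :
    (ms.foldl (fun d m => d.insert m (0 : Nat)) PySem.Dict.empty).getD m0 0 = 0 := by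
  by_cases h : m0 ∈ ms
  · exact pv_foldl_insert_getD (fun _ => 0) ms PySem.Dict.empty m0 0 hnd h
  · rw [pv_foldl_insert_getD_not_mem _ _ _ _ _ h, PySem.Dict.getD_empty]

-- the ordered band list: Nodup, and its members are exactly the distinct bands
lemma pvBandsC_facts (l : List (List (String × String))) :
    (pvBandsC l).Nodup ∧ ∀ x, x ∈ pvBandsC l ↔ x ∈ PySem.Set.ofList (l.map pvBand) := by
  have hK : (PySem.Set.ofList (l.map pvBand)).Nodup := PySem.Set.nodup_ofList _
  simp only [pvBandsC]
  set K := PySem.Set.ofList (l.map pvBand) with hKdef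
  set first := pvPref.filter (fun b => K.contains b) with hfirst
  set rest := PySem.List.sorted (K.filter (fun b => !pvPref.contains b && !(b == "UNKNOWN")))
    (fun x => x) false with hrest
  have hperm := PySem.List.sorted_perm
    (K.filter (fun b => !pvPref.contains b && !(b == "UNKNOWN"))) (fun x : String => x) false
  have hmem_first : ∀ x, x ∈ first ↔ x ∈ pvPref ∧ x ∈ K := by
    intro x; rw [hfirst, List.mem_filter, PySem.Set.contains_iff]
  have hmem_rest : ∀ x, x ∈ rest ↔ x ∈ K ∧ x ∉ pvPref ∧ x ≠ "UNKNOWN" := by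
    intro x; rw [hrest, hperm.mem_iff, List.mem_filter]
    simp
  have hnd_first : first.Nodup := List.Nodup.filter _ (by decide)
  have hnd_rest : rest.Nodup := hperm.nodup_iff.mpr (List.Nodup.filter _ hK)
  have hdisj : ∀ x ∈ first, x ∉ rest := by
    intro x hx hx'
    exact ((hmem_rest x).mp hx').2.1 ((hmem_first x).mp hx).1
  have hnd2 : (first ++ rest).Nodup := by
    rw [List.nodup_append]
    exact ⟨hnd_first, hnd_rest, fun x hx b hb hxb => hdisj x hx (hxb ▸ hb)⟩
  have hmem2 : ∀ x, x ∈ first ++ rest ↔ (x ∈ K ∧ x ≠ "UNKNOWN") ∨ (x ∈ pvPref ∧ x ∈ K) := by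
    intro x
    rw [List.mem_append, hmem_first, hmem_rest]
    constructor
    · rintro (⟨h1, h2⟩ | ⟨h1, h2, h3⟩)
      · exact Or.inr ⟨h1, h2⟩
      · exact Or.inl ⟨h1, h3⟩
    · rintro (⟨h1, h2⟩ | ⟨h1, h2⟩)
      · by_cases hp : x ∈ pvPref
        · exact Or.inl ⟨hp, h1⟩
        · exact Or.inr ⟨h1, hp, h2⟩
      · exact Or.inl ⟨h1, h2⟩
  have hUP : "UNKNOWN" ∉ pvPref := by decide
  by_cases hu : K.contains "UNKNOWN" = true
  · rw [if_pos hu]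
    have hUmem : "UNKNOWN" ∈ K := (PySem.Set.contains_iff _ _).mp hu
    constructor
    · rw [List.nodup_append]
      refine ⟨hnd2, List.nodup_singleton _, ?_⟩
      intro x hx b hb hxb
      rw [List.mem_singleton] at hb
      subst hb; subst hxb
      rcases (hmem2 _).mp hx with ⟨_, h2⟩ | ⟨h1, _⟩
      · exact h2 rfl
      · exact hUP h1
    · intro x
      simp only [List.mem_append, hmem2, List.mem_singleton]
      constructor
      · rintro ((⟨h1, _⟩ | ⟨_, h1⟩) | rfl)
        · exact h1
        · exact h1
        · exact hUmem
      · intro hxK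
        by_cases hx : x = "UNKNOWN"
        · exact Or.inr hx
        · exact Or.inl (Or.inl ⟨hxK, hx⟩)
  · rw [if_neg hu]
    refine ⟨hnd2, ?_⟩
    intro x
    rw [hmem2]
    constructor
    · rintro (⟨h1, _⟩ | ⟨_, h1⟩) <;> exact h1
    · intro hxK
      by_cases hx : x = "UNKNOWN"
      · subst hx; exact absurd ((PySem.Set.contains_iff _ _).mpr hxK) hu
      · exact Or.inl ⟨hxK, hx⟩

-- the ordered display-mode list: Nodup, and its members are exactly the display modes
lemma pvModes_facts (M : List String) (hM : M.Nodup) :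
    ((["CW", "Phone", "DIG"] : List String).filter (fun m => PySem.Set.contains M m)
        ++ PySem.List.sorted
            (M.filter (fun m => !((["CW", "Phone", "DIG"] : List String).filter
                (fun m' => PySem.Set.contains M m')).contains m)) (fun x => x) false).Nodup
    ∧ ∀ x, x ∈ ((["CW", "Phone", "DIG"] : List String).filter (fun m => PySem.Set.contains M m)
        ++ PySem.List.sorted
            (M.filter (fun m => !((["CW", "Phone", "DIG"] : List String).filter
                (fun m' => PySem.Set.contains M m')).contains m)) (fun x => x) false) ↔ x ∈ M := by
  set first := (["CW", "Phone", "DIG"] : List String).filter (fun m => PySem.Set.contains M m)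
    with hfirst
  have hperm := PySem.List.sorted_perm
    (M.filter (fun m => !first.contains m)) (fun x : String => x) false
  have hmem_first : ∀ x, x ∈ first ↔ x ∈ (["CW", "Phone", "DIG"] : List String) ∧ x ∈ M := by
    intro x; rw [hfirst, List.mem_filter, PySem.Set.contains_iff]
  have hmem_rest : ∀ x, x ∈ PySem.List.sorted (M.filter (fun m => !first.contains m))
      (fun x : String => x) false ↔ x ∈ M ∧ x ∉ first := by
    intro x; rw [hperm.mem_iff, List.mem_filter]
    simp
  constructor
  · rw [List.nodup_append]
    refine ⟨List.Nodup.filter _ (by decide),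
      hperm.nodup_iff.mpr (List.Nodup.filter _ hM), ?_⟩
    intro x hx b hb hxb
    subst hxb
    exact ((hmem_rest x).mp hb).2 hx
  · intro x
    rw [List.mem_append, hmem_first, hmem_rest]
    constructor
    · rintro (⟨_, h⟩ | ⟨h, _⟩) <;> exact h
    · intro hxM
      by_cases hx : x ∈ first
      · exact Or.inl ((hmem_first x).mp hx)
      · exact Or.inr ⟨hxM, hx⟩

lemma cBD_CW (l : List (List (String × String))) (b : String) :
    cBD l b "CW" = l.countP (fun q => pvBand q == b && pvIsCW (pvMode q)) := by
  unfold cBD; exact List.countP_congr (fun q _ => by rw [pvDisp_eq_CW])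
lemma cBD_Ph (l : List (List (String × String))) (b : String) :
    cBD l b "Phone" = l.countP (fun q => pvBand q == b && pvIsPh (pvMode q)) := by
  unfold cBD; exact List.countP_congr (fun q _ => by rw [pvDisp_eq_Ph])
lemma cBD_Dg (l : List (List (String × String))) (b : String) :
    cBD l b "DIG" = l.countP (fun q => pvBand q == b && pvIsDg (pvMode q)) := by
  unfold cBD; exact List.countP_congr (fun q _ => by rw [pvDisp_eq_Dg])
lemma cD_CW (l : List (List (String × String))) :
    cD l "CW" = l.countP (fun q => pvIsCW (pvMode q)) := by
  unfold cD; exact List.countP_congr (fun q _ => by rw [pvDisp_eq_CW])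
lemma cD_Ph (l : List (List (String × String))) :
    cD l "Phone" = l.countP (fun q => pvIsPh (pvMode q)) := by
  unfold cD; exact List.countP_congr (fun q _ => by rw [pvDisp_eq_Ph])
lemma cD_Dg (l : List (List (String × String))) :
    cD l "DIG" = l.countP (fun q => pvIsDg (pvMode q)) := by
  unfold cD; exact List.countP_congr (fun q _ => by rw [pvDisp_eq_Dg])

lemma pvB_canon (l : List (List (String × String))) :
    generate_band_mode_breakdown_py_alt l = pvCanon l := by
  simp only [generate_band_mode_breakdown_py_alt]
  have hK := pvB_keys l (PySem.Dict.empty, 0, 0, 0)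
  rw [show (((PySem.Dict.empty, 0, 0, 0) : PySem.Dict String (Nat × Nat × Nat × Nat) × Nat × Nat × Nat)).1.keys = [] from rfl,
    PySem.Set.update_nil_left] at hK
  obtain ⟨hc1, hc2, hc3⟩ := pvB_counters l (PySem.Dict.empty, 0, 0, 0)
  have hcont : ∀ b : String, (l.foldl pvStepB (PySem.Dict.empty, 0, 0, 0)).1.contains b
      = (PySem.Set.ofList (l.map pvBand)).contains b := by
    intro b
    rw [PySem.Dict.contains_eq_decide_mem_keys, hK]
    simp [PySem.Set.contains_eq_listContains]
  simp only [hc1, hc2, hc3, hK, hcont, pvB_getD, Nat.zero_add,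
    show (((PySem.Dict.empty, 0, 0, 0) : PySem.Dict String (Nat × Nat × Nat × Nat) × Nat × Nat × Nat)).1.getD _ (0,0,0,0) = (0,0,0,0) from rfl,
    PySem.List.foldl_append_singleton_eq_map]
  simp only [pvCanon, pvBandsC, cBD_CW, cBD_Ph, cBD_Dg, cD_CW, cD_Ph, cD_Dg, cB]

lemma pvA_canon (l : List (List (String × String))) :
    generate_band_mode_breakdown_py l = pvCanon l := by
  simp only [generate_band_mode_breakdown_py]
  have hbset := pvA_bset l (PySem.Dict.empty, PySem.Set.empty, PySem.Set.empty)
  have hmset := pvA_mset l (PySem.Dict.empty, PySem.Set.empty, PySem.Set.empty)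
  rw [show ((PySem.Dict.empty, PySem.Set.empty, PySem.Set.empty) :
      PySem.Dict String (PySem.Dict String Nat) × PySem.Set String × PySem.Set String).2.1
      = PySem.Set.empty from rfl, PySem.Set.update_empty] at hbset
  rw [show ((PySem.Dict.empty, PySem.Set.empty, PySem.Set.empty) :
      PySem.Dict String (PySem.Dict String Nat) × PySem.Set String × PySem.Set String).2.2
      = PySem.Set.empty from rfl, PySem.Set.update_empty] at hmset
  rw [hbset, hmset]
  have hmset_nd : (PySem.Set.ofList (l.map pvMode)).Nodup := PySem.Set.nodup_ofList _
  -- A's display-map loop inserts m ↦ pvDisp m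
  have hmdm : ∀ (d : PySem.Dict String String) (m : String),
      (if PySem.Str.upper m == "CW" then d.insert m "CW"
       else if ["SSB", "PHONE", "FM", "AM"].contains (PySem.Str.upper m) then d.insert m "Phone"
       else if ["FT8", "FT4", "PSK31", "DIGITAL", "DIG"].contains (PySem.Str.upper m) then
         d.insert m "DIG"
       else d.insert m m) = d.insert m (pvDisp m) := by
    intro d m
    unfold pvDisp pvPhoneL pvDigL
    split_ifs <;> rfl
  simp only [hmdm]
  -- the display map's values and lookups
  have hitems := PySem.Dict.items_foldl_insert_fresh (PySem.Set.ofList (l.map pvMode))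
    (fun m => m) pvDisp PySem.Dict.empty
    (fun m _ => PySem.Dict.contains_empty _) (by simpa using hmset_nd)
  have hvals : ((PySem.Set.ofList (l.map pvMode)).foldl
      (fun d m => d.insert m (pvDisp m)) PySem.Dict.empty).values
      = (PySem.Set.ofList (l.map pvMode)).map pvDisp := by
    show ((PySem.Set.ofList (l.map pvMode)).foldl
      (fun d m => d.insert m (pvDisp m)) PySem.Dict.empty).items.map Prod.snd = _
    rw [hitems, show (PySem.Dict.empty : PySem.Dict String String).items = [] from rfl]
    simp [Function.comp]
  rw [hvals]
  have hmdm_getD : ∀ m ∈ PySem.Set.ofList (l.map pvMode),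
      ((PySem.Set.ofList (l.map pvMode)).foldl
        (fun d m => d.insert m (pvDisp m)) PySem.Dict.empty).getD m "" = pvDisp m :=
    fun m hm => pv_foldl_insert_getD pvDisp _ _ m "" hmset_nd hm
  -- canonicalize A's band list into pvBandsC l
  have hKnd : (PySem.Set.ofList (l.map pvBand)).Nodup := PySem.Set.nodup_ofList _
  have hfilt : (PySem.Set.ofList (l.map pvBand)).filter
        (fun b => !(pvPref.filter (fun b' => PySem.Set.contains (PySem.Set.ofList (l.map pvBand)) b')).contains b
          && !(b == "UNKNOWN"))
      = (PySem.Set.ofList (l.map pvBand)).filter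
        (fun b => !pvPref.contains b && !(b == "UNKNOWN")) := by
    apply List.filter_congr
    intro b hb
    have hKb : PySem.Set.contains (PySem.Set.ofList (l.map pvBand)) b = true :=
      (PySem.Set.contains_iff _ _).mpr hb
    have hex : ∃ a ∈ l, pvBand a = b := by
      simpa [PySem.Set.mem_ofList, List.mem_map] using hb
    simp [List.mem_filter, PySem.Set.contains_iff, hb, hex]
  rw [hfilt]
  obtain ⟨hBandsNd, hBandsMem⟩ := pvBandsC_facts l
  rw [show (if PySem.Set.contains (PySem.Set.ofList (l.map pvBand)) "UNKNOWN" = true then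
        (pvPref.filter (fun b => PySem.Set.contains (PySem.Set.ofList (l.map pvBand)) b)
          ++ PySem.List.sorted ((PySem.Set.ofList (l.map pvBand)).filter
              (fun b => !pvPref.contains b && !(b == "UNKNOWN"))) (fun x => x) false) ++ ["UNKNOWN"]
      else
        pvPref.filter (fun b => PySem.Set.contains (PySem.Set.ofList (l.map pvBand)) b)
          ++ PySem.List.sorted ((PySem.Set.ofList (l.map pvBand)).filter
              (fun b => !pvPref.contains b && !(b == "UNKNOWN"))) (fun x => x) false)
      = pvBandsC l from rfl]
  -- mode-list facts and coverage
  obtain ⟨hModesNd, hModesMem⟩ :=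
    pvModes_facts (PySem.Set.ofList ((PySem.Set.ofList (l.map pvMode)).map pvDisp))
      (PySem.Set.nodup_ofList _)
  have hcovMset : ∀ x ∈ l, pvMode x ∈ PySem.Set.ofList (l.map pvMode) := by
    intro x hx
    exact (PySem.Set.mem_ofList _ _).mpr (List.mem_map_of_mem hx)
  have hcovModes : ∀ x ∈ l, pvDisp (pvMode x)
      ∈ (["CW", "Phone", "DIG"] : List String).filter
          (fun m => PySem.Set.contains (PySem.Set.ofList ((PySem.Set.ofList (l.map pvMode)).map pvDisp)) m)
        ++ PySem.List.sorted
            ((PySem.Set.ofList ((PySem.Set.ofList (l.map pvMode)).map pvDisp)).filter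
              (fun m => !((["CW", "Phone", "DIG"] : List String).filter
                (fun m' => PySem.Set.contains (PySem.Set.ofList ((PySem.Set.ofList (l.map pvMode)).map pvDisp)) m')).contains m))
            (fun x => x) false := by
    intro x hx
    exact (hModesMem _).mpr ((PySem.Set.mem_ofList _ _).mpr (List.mem_map_of_mem (hcovMset x hx)))
  have hcovBands : ∀ x ∈ l, pvBand x ∈ pvBandsC l := by
    intro x hx
    exact (hBandsMem _).mpr ((PySem.Set.mem_ofList _ _).mpr (List.mem_map_of_mem hx))
  -- raw band×mode counts
  have hbmc : ∀ b m, (((l.foldl pvStepA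
        (PySem.Dict.empty, PySem.Set.empty, PySem.Set.empty)).1).getD b PySem.Dict.empty).getD m 0
      = cBM l b m := by
    intro b m
    rw [pvA_bmc]
    rw [show ((PySem.Dict.empty, PySem.Set.empty, PySem.Set.empty) :
      PySem.Dict String (PySem.Dict String Nat) × PySem.Set String × PySem.Set String).1
      = PySem.Dict.empty from rfl, PySem.Dict.getD_empty, PySem.Dict.getD_empty, Nat.zero_add]
  -- the band×mode summary: entry (b, d0) counts QSOs on band b with display mode d0
  have hbms : ∀ b ∈ pvBandsC l, ∀ d0 : String,
      (((pvBandsC l).foldl (fun s band => (PySem.Set.ofList (l.map pvMode)).foldl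
          (fun s mode => s.modify band PySem.Dict.empty
            (fun inner => inner.modify
              (((PySem.Set.ofList (l.map pvMode)).foldl
                  (fun d m => d.insert m (pvDisp m)) PySem.Dict.empty).getD mode "") 0
              (· + (((l.foldl pvStepA (PySem.Dict.empty, PySem.Set.empty, PySem.Set.empty)).1).getD band PySem.Dict.empty).getD mode 0)))
          (s.insert band PySem.Dict.empty)) PySem.Dict.empty).getD b PySem.Dict.empty).getD d0 0
      = cBD l b d0 := by
    intro b hb d0
    rw [pvA_bms_getD _ _ _ _ b hb hBandsNd]
    have hstep : ∀ (inn : PySem.Dict String Nat) (mode : String),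
        mode ∈ PySem.Set.ofList (l.map pvMode) →
        inn.modify (((PySem.Set.ofList (l.map pvMode)).foldl
            (fun d m => d.insert m (pvDisp m)) PySem.Dict.empty).getD mode "") 0
          (· + (((l.foldl pvStepA (PySem.Dict.empty, PySem.Set.empty, PySem.Set.empty)).1).getD b PySem.Dict.empty).getD mode 0)
        = inn.modify (pvDisp mode) 0 (· + cBM l b mode) := by
      intro inn mode hm
      rw [hmdm_getD mode hm, hbmc]
    rw [PySem.List.foldl_congr_mem _ _ (fun inn mode => inn.modify (pvDisp mode) 0 (· + cBM l b mode)) _ hstep, pv_inner_val _ pvDisp (cBM l b) _ d0,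
      PySem.Dict.getD_empty, Nat.zero_add]
    have hfn : (fun m => if d0 = pvDisp m then cBM l b m else 0)
        = (fun m => if (fun m' => pvDisp m' == d0) m = true
            then l.countP (fun x => (fun x' => pvBand x' == b) x && pvMode x == m) else 0) := by
      funext m
      by_cases h : d0 = pvDisp m
      · simp [h, cBM]
      · simp [h, Ne.symm h]
    rw [hfn, pv_partition l pvMode _ _ _ hmset_nd hcovMset]
    unfold cBD
    rfl
  -- per-band row sums and totals
  have hsum : ∀ b ∈ pvBandsC l, (((["CW", "Phone", "DIG"] : List String).filter
          (fun m => PySem.Set.contains (PySem.Set.ofList ((PySem.Set.ofList (l.map pvMode)).map pvDisp)) m)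
        ++ PySem.List.sorted
            ((PySem.Set.ofList ((PySem.Set.ofList (l.map pvMode)).map pvDisp)).filter
              (fun m => !((["CW", "Phone", "DIG"] : List String).filter
                (fun m' => PySem.Set.contains (PySem.Set.ofList ((PySem.Set.ofList (l.map pvMode)).map pvDisp)) m')).contains m))
            (fun x => x) false).map (fun mode => (((pvBandsC l).foldl (fun s band => (PySem.Set.ofList (l.map pvMode)).foldl
          (fun s mode => s.modify band PySem.Dict.empty
            (fun inner => inner.modify
              ((((PySem.Set.ofList (l.map pvMode)).foldl (fun d m => d.insert m (pvDisp m)) PySem.Dict.empty)).getD mode "") 0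
              (· + (((l.foldl pvStepA (PySem.Dict.empty, PySem.Set.empty, PySem.Set.empty)).1).getD band PySem.Dict.empty).getD mode 0)))
          (s.insert band PySem.Dict.empty)) PySem.Dict.empty).getD b PySem.Dict.empty).getD mode 0)).sum = cB l b := by
    intro b hb
    have hp := pv_partition l (fun x => pvDisp (pvMode x)) ((["CW", "Phone", "DIG"] : List String).filter
          (fun m => PySem.Set.contains (PySem.Set.ofList ((PySem.Set.ofList (l.map pvMode)).map pvDisp)) m)
        ++ PySem.List.sorted
            ((PySem.Set.ofList ((PySem.Set.ofList (l.map pvMode)).map pvDisp)).filter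
              (fun m => !((["CW", "Phone", "DIG"] : List String).filter
                (fun m' => PySem.Set.contains (PySem.Set.ofList ((PySem.Set.ofList (l.map pvMode)).map pvDisp)) m')).contains m))
            (fun x => x) false)
      (fun x => pvBand x == b) (fun _ => true) hModesNd hcovModes
    rw [List.map_congr_left (fun m _ => by
      rw [hbms b hb m]; simp [cBD] : ∀ m ∈ ((["CW", "Phone", "DIG"] : List String).filter
          (fun m => PySem.Set.contains (PySem.Set.ofList ((PySem.Set.ofList (l.map pvMode)).map pvDisp)) m)
        ++ PySem.List.sorted
            ((PySem.Set.ofList ((PySem.Set.ofList (l.map pvMode)).map pvDisp)).filter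
              (fun m => !((["CW", "Phone", "DIG"] : List String).filter
                (fun m' => PySem.Set.contains (PySem.Set.ofList ((PySem.Set.ofList (l.map pvMode)).map pvDisp)) m')).contains m))
            (fun x => x) false),
        (((pvBandsC l).foldl (fun s band => (PySem.Set.ofList (l.map pvMode)).foldl
          (fun s mode => s.modify band PySem.Dict.empty
            (fun inner => inner.modify
              ((((PySem.Set.ofList (l.map pvMode)).foldl (fun d m => d.insert m (pvDisp m)) PySem.Dict.empty)).getD mode "") 0
              (· + (((l.foldl pvStepA (PySem.Dict.empty, PySem.Set.empty, PySem.Set.empty)).1).getD band PySem.Dict.empty).getD mode 0)))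
          (s.insert band PySem.Dict.empty)) PySem.Dict.empty).getD b PySem.Dict.empty).getD m 0
        = if true = true then l.countP (fun x => (pvBand x == b) && (pvDisp (pvMode x) == m)) else 0),
      hp]
    unfold cB
    exact List.countP_congr (fun x _ => by simp)
  have hgrand : (0 + ((pvBandsC l).map (fun band => (((["CW", "Phone", "DIG"] : List String).filter
          (fun m => PySem.Set.contains (PySem.Set.ofList ((PySem.Set.ofList (l.map pvMode)).map pvDisp)) m)
        ++ PySem.List.sorted
            ((PySem.Set.ofList ((PySem.Set.ofList (l.map pvMode)).map pvDisp)).filter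
              (fun m => !((["CW", "Phone", "DIG"] : List String).filter
                (fun m' => PySem.Set.contains (PySem.Set.ofList ((PySem.Set.ofList (l.map pvMode)).map pvDisp)) m')).contains m))
            (fun x => x) false).map (fun mode => (((pvBandsC l).foldl (fun s band => (PySem.Set.ofList (l.map pvMode)).foldl
          (fun s mode => s.modify band PySem.Dict.empty
            (fun inner => inner.modify
              ((((PySem.Set.ofList (l.map pvMode)).foldl (fun d m => d.insert m (pvDisp m)) PySem.Dict.empty)).getD mode "") 0
              (· + (((l.foldl pvStepA (PySem.Dict.empty, PySem.Set.empty, PySem.Set.empty)).1).getD band PySem.Dict.empty).getD mode 0)))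
          (s.insert band PySem.Dict.empty)) PySem.Dict.empty).getD band PySem.Dict.empty).getD mode 0)).sum)).sum) = l.length := by
    rw [Nat.zero_add, List.map_congr_left hsum]
    have hp := pv_partition l pvBand (pvBandsC l) (fun _ => true) (fun _ => true)
      hBandsNd hcovBands
    rw [show (cB l)
        = (fun b => if true = true then l.countP (fun x => true && (pvBand x == b)) else 0) from
        funext (fun b => by simp [cB]), hp]
    simp
  have hbt : ∀ b ∈ pvBandsC l,
      ((pvBandsC l).foldl (fun bt band => bt.insert band ((((["CW", "Phone", "DIG"] : List String).filter
          (fun m => PySem.Set.contains (PySem.Set.ofList ((PySem.Set.ofList (l.map pvMode)).map pvDisp)) m)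
        ++ PySem.List.sorted
            ((PySem.Set.ofList ((PySem.Set.ofList (l.map pvMode)).map pvDisp)).filter
              (fun m => !((["CW", "Phone", "DIG"] : List String).filter
                (fun m' => PySem.Set.contains (PySem.Set.ofList ((PySem.Set.ofList (l.map pvMode)).map pvDisp)) m')).contains m))
            (fun x => x) false).map (fun mode => (((pvBandsC l).foldl (fun s band => (PySem.Set.ofList (l.map pvMode)).foldl
          (fun s mode => s.modify band PySem.Dict.empty
            (fun inner => inner.modify
              ((((PySem.Set.ofList (l.map pvMode)).foldl (fun d m => d.insert m (pvDisp m)) PySem.Dict.empty)).getD mode "") 0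
              (· + (((l.foldl pvStepA (PySem.Dict.empty, PySem.Set.empty, PySem.Set.empty)).1).getD band PySem.Dict.empty).getD mode 0)))
          (s.insert band PySem.Dict.empty)) PySem.Dict.empty).getD band PySem.Dict.empty).getD mode 0)).sum)) PySem.Dict.empty).getD b 0
        = cB l b := by
    intro b hb
    rw [pv_foldl_insert_getD _ _ _ _ _ hBandsNd hb]
    exact hsum b hb
  have hmt : ∀ d0 : String,
      ((pvBandsC l).foldl (fun mt band => ((["CW", "Phone", "DIG"] : List String).filter
          (fun m => PySem.Set.contains (PySem.Set.ofList ((PySem.Set.ofList (l.map pvMode)).map pvDisp)) m)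
        ++ PySem.List.sorted
            ((PySem.Set.ofList ((PySem.Set.ofList (l.map pvMode)).map pvDisp)).filter
              (fun m => !((["CW", "Phone", "DIG"] : List String).filter
                (fun m' => PySem.Set.contains (PySem.Set.ofList ((PySem.Set.ofList (l.map pvMode)).map pvDisp)) m')).contains m))
            (fun x => x) false).foldl
          (fun mt mode => mt.modify mode 0 (· + (((pvBandsC l).foldl (fun s band => (PySem.Set.ofList (l.map pvMode)).foldl
          (fun s mode => s.modify band PySem.Dict.empty
            (fun inner => inner.modify
              ((((PySem.Set.ofList (l.map pvMode)).foldl (fun d m => d.insert m (pvDisp m)) PySem.Dict.empty)).getD mode "") 0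
              (· + (((l.foldl pvStepA (PySem.Dict.empty, PySem.Set.empty, PySem.Set.empty)).1).getD band PySem.Dict.empty).getD mode 0)))
          (s.insert band PySem.Dict.empty)) PySem.Dict.empty).getD band PySem.Dict.empty).getD mode 0)) mt)
        (((["CW", "Phone", "DIG"] : List String).filter
          (fun m => PySem.Set.contains (PySem.Set.ofList ((PySem.Set.ofList (l.map pvMode)).map pvDisp)) m)
        ++ PySem.List.sorted
            ((PySem.Set.ofList ((PySem.Set.ofList (l.map pvMode)).map pvDisp)).filter
              (fun m => !((["CW", "Phone", "DIG"] : List String).filter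
                (fun m' => PySem.Set.contains (PySem.Set.ofList ((PySem.Set.ofList (l.map pvMode)).map pvDisp)) m')).contains m))
            (fun x => x) false).foldl (fun d m => d.insert m (0 : Nat)) PySem.Dict.empty)).getD d0 0 = cD l d0 := by
    intro d0
    rw [pvA_mt, pv_mt0 _ hModesNd d0, Nat.zero_add]
    by_cases hd : d0 ∈ ((["CW", "Phone", "DIG"] : List String).filter
          (fun m => PySem.Set.contains (PySem.Set.ofList ((PySem.Set.ofList (l.map pvMode)).map pvDisp)) m)
        ++ PySem.List.sorted
            ((PySem.Set.ofList ((PySem.Set.ofList (l.map pvMode)).map pvDisp)).filter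
              (fun m => !((["CW", "Phone", "DIG"] : List String).filter
                (fun m' => PySem.Set.contains (PySem.Set.ofList ((PySem.Set.ofList (l.map pvMode)).map pvDisp)) m')).contains m))
            (fun x => x) false)
    · rw [List.map_congr_left (fun band _ => pv_sum_single _ d0 _ hModesNd hd),
        List.map_congr_left (fun band hb => hbms band hb d0)]
      have hp := pv_partition l pvBand (pvBandsC l)
        (fun x => pvDisp (pvMode x) == d0) (fun _ => true) hBandsNd hcovBands
      rw [show (fun band => cBD l band d0)
          = (fun band => if true = true
              then l.countP (fun x => (pvDisp (pvMode x) == d0) && (pvBand x == band)) else 0) from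
          funext (fun band => by
            simp only [if_pos rfl, cBD]
            exact List.countP_congr (fun x _ => by rw [Bool.and_comm])), hp]
      unfold cD
      exact List.countP_congr (fun x _ => by simp)
    · rw [List.map_congr_left (fun band _ => pv_sum_zero_of_not_mem _ d0 _ hd)]
      have hz : cD l d0 = 0 := by
        unfold cD
        rw [List.countP_eq_zero]
        intro x hx hcontra
        exact hd (by rw [← beq_iff_eq.mp hcontra]; exact hcovModes x hx)
      rw [hz]
      simp
  -- assemble
  rw [pvA_tot]
  rw [show ((PySem.Dict.empty, ((["CW", "Phone", "DIG"] : List String).filter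
          (fun m => PySem.Set.contains (PySem.Set.ofList ((PySem.Set.ofList (l.map pvMode)).map pvDisp)) m)
        ++ PySem.List.sorted
            ((PySem.Set.ofList ((PySem.Set.ofList (l.map pvMode)).map pvDisp)).filter
              (fun m => !((["CW", "Phone", "DIG"] : List String).filter
                (fun m' => PySem.Set.contains (PySem.Set.ofList ((PySem.Set.ofList (l.map pvMode)).map pvDisp)) m')).contains m))
            (fun x => x) false).foldl (fun d m => d.insert m (0 : Nat)) PySem.Dict.empty, 0) :
        PySem.Dict String Nat × PySem.Dict String Nat × Nat).1 = PySem.Dict.empty from rfl,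
      show ((PySem.Dict.empty, ((["CW", "Phone", "DIG"] : List String).filter
          (fun m => PySem.Set.contains (PySem.Set.ofList ((PySem.Set.ofList (l.map pvMode)).map pvDisp)) m)
        ++ PySem.List.sorted
            ((PySem.Set.ofList ((PySem.Set.ofList (l.map pvMode)).map pvDisp)).filter
              (fun m => !((["CW", "Phone", "DIG"] : List String).filter
                (fun m' => PySem.Set.contains (PySem.Set.ofList ((PySem.Set.ofList (l.map pvMode)).map pvDisp)) m')).contains m))
            (fun x => x) false).foldl (fun d m => d.insert m (0 : Nat)) PySem.Dict.empty, 0) :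
        PySem.Dict String Nat × PySem.Dict String Nat × Nat).2.1 = (((["CW", "Phone", "DIG"] : List String).filter
          (fun m => PySem.Set.contains (PySem.Set.ofList ((PySem.Set.ofList (l.map pvMode)).map pvDisp)) m)
        ++ PySem.List.sorted
            ((PySem.Set.ofList ((PySem.Set.ofList (l.map pvMode)).map pvDisp)).filter
              (fun m => !((["CW", "Phone", "DIG"] : List String).filter
                (fun m' => PySem.Set.contains (PySem.Set.ofList ((PySem.Set.ofList (l.map pvMode)).map pvDisp)) m')).contains m))
            (fun x => x) false).foldl (fun d m => d.insert m (0 : Nat)) PySem.Dict.empty) from rfl,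
      show ((PySem.Dict.empty, ((["CW", "Phone", "DIG"] : List String).filter
          (fun m => PySem.Set.contains (PySem.Set.ofList ((PySem.Set.ofList (l.map pvMode)).map pvDisp)) m)
        ++ PySem.List.sorted
            ((PySem.Set.ofList ((PySem.Set.ofList (l.map pvMode)).map pvDisp)).filter
              (fun m => !((["CW", "Phone", "DIG"] : List String).filter
                (fun m' => PySem.Set.contains (PySem.Set.ofList ((PySem.Set.ofList (l.map pvMode)).map pvDisp)) m')).contains m))
            (fun x => x) false).foldl (fun d m => d.insert m (0 : Nat)) PySem.Dict.empty, 0) :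
        PySem.Dict String Nat × PySem.Dict String Nat × Nat).2.2 = (0 : Nat) from rfl]
  simp only [hgrand]
  rw [hmt, hmt, hmt]
  rw [PySem.List.foldl_congr_mem _ _
    (fun (sec : List String) band => sec ++ [pvFmtRow band (cBD l band "CW") (cBD l band "Phone")
      (cBD l band "DIG") (cB l band)
      (if 0 < l.length then pvPct (cB l band) l.length else 0)]) _
    (fun sec band hb => by
      rw [hbms band hb "CW", hbms band hb "Phone", hbms band hb "DIG", hbt band hb])]
  rw [PySem.List.foldl_append_singleton_eq_map]
  simp only [pvCanon]


-- ===== VERDICT (by name: the statement is the Claim_ definition above) =====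
theorem generate_band_mode_breakdown_py_spec : Claim_equal_generate_band_mode_breakdown_py := by
  intro qsos _
  unfold Spec_generate_band_mode_breakdown_py
  exact (pvA_canon qsos).trans (pvB_canon qsos).symm
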